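-- pv_equiv track=rewrite | github.com/zh616110538/animerecommend | bgmdatasort.py | genDic
-- ===== SOURCE A (Python) =====
-- def genDic(data):
--     resubject = {}  # {index:subject}
--     subject = {}  # {subject:index}
--     count = 0
--     for user in data:
--         for sub in user[1:]:
--             if not sub[0] in subject:
--                 subject[sub[0]] = count
--                 resubject[count] = sub[0]
--                 count+=1
--     return subject,resubject
-- ===== SOURCE B (Python) =====
-- def genDic(data):
--     keys = [sub[0] for user in data for sub in user[1:]]
--     first = {}
--     for pos in range(len(keys) - 1, -1, -1):
--         first[keys[pos]] = pos
--     order = sorted(first, key=first.get)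
--     subject = {s: i for i, s in enumerate(order)}
--     resubject = dict(enumerate(order))
--     return subject, resubject
-- ===== Notes on version B (the rewrite author's own statement) =====
-- stated objective: alternative
-- what changed: Replaces A's single incremental pass (two dicts grown together with an explicit counter) by a sort-based pipeline: flatten all subject ids, record each id's first position via one backward overwrite pass over positions, sort the distinct ids by that first position, and build both dicts by enumerating the sorted list.
import Mathlib
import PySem

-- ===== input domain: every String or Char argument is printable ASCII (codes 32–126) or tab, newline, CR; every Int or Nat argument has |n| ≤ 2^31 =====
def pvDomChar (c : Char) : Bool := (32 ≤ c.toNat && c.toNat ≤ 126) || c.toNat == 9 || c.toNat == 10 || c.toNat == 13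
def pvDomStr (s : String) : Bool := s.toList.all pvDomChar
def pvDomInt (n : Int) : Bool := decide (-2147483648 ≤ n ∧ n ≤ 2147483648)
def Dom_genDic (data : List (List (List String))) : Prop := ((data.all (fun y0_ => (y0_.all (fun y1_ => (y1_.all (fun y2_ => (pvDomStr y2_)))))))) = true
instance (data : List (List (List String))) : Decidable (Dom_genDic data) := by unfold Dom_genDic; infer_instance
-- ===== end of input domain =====

-- B replaces A's single incremental pass (two dicts + a counter) by: flatten the keys, record each key's
-- first position with a backward overwrite pass, sort the distinct keys by that position, then index them ("alternative").

-- ===== PORT A =====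
-- the loop body of A: sub[0] looked up / inserted into (subject, resubject, count)
def genDicStep (st : (List (String × Int)) × (List (Int × String)) × Int) (sub : List String) :
    (List (String × Int)) × (List (Int × String)) × Int :=
  let key := sub.headD ""   -- sub[0]; Pre_ excludes empty sub (IndexError)
  if (st.1.map Prod.fst).contains key then st
  else (st.1 ++ [(key, st.2.2)], st.2.1 ++ [(st.2.2, key)], st.2.2 + 1)

def genDic (data : List (List (List String))) : (List (String × Int)) × (List (Int × String)) :=
  let st := data.foldl (fun st user => (user.drop 1).foldl genDicStep st) ([], [], 0)
  (st.1, st.2.1)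

-- ===== PORT B =====
def genDic_alt (data : List (List (List String))) : (List (String × Int)) × (List (Int × String)) :=
  -- keys = [sub[0] for user in data for sub in user[1:]]   (sub[0]: Pre_ excludes empty sub)
  let keys := data.flatMap (fun user => (user.drop 1).map (fun sub => sub.headD ""))
  -- for pos in range(len(keys)-1, -1, -1): first[keys[pos]] = pos
  let first := (PySem.List.pyRange ((keys.length : Int) - 1) (-1) (-1)).foldl
      (fun d pos => d.insert (PySem.List.pyGetD keys pos "") pos) PySem.Dict.empty
  -- order = sorted(first, key=first.get)
  let order := PySem.List.sorted (PySem.Dict.keys first) (fun k => first.getD k 0)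
  -- subject = {s: i for i, s in enumerate(order)}; resubject = dict(enumerate(order))
  ((PySem.List.enumerate order).map (fun p => (p.2, p.1)), PySem.List.enumerate order)

-- ===== PRECONDITION & SPEC =====
-- Pre_ excludes exactly the inputs where sub[0] raises IndexError (an empty sub list after the first element of a user).
def Pre_genDic (data : List (List (List String))) : Prop :=
  ∀ user ∈ data, ∀ sub ∈ user.drop 1, sub ≠ []
instance (data : List (List (List String))) : Decidable (Pre_genDic data) := by unfold Pre_genDic; infer_instance
def pvWitness_genDic : List (List (List String)) := [[["u1"], ["s1"], ["s2"]], [["u2"], ["s2"]]]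

def Spec_genDic (data : List (List (List String))) (out : (List (String × Int)) × (List (Int × String))) : Prop := out = genDic_alt data
instance (data : List (List (List String))) (out : (List (String × Int)) × (List (Int × String))) : Decidable (Spec_genDic data out) := by unfold Spec_genDic; infer_instance

-- ===== CLAIM (what is proved, stated in full; the proofs are below) =====
def Claim_equal_genDic : Prop := ∀ (data : List (List (List String))), Dom_genDic data → Pre_genDic data → Spec_genDic data (genDic data)

-- ===== LEMMAS AND PROOFS =====

-- A-SIDE: A's state after processing keys, expressed from the deduplicated prefix u
def genDicState (u : List String) : (List (String × Int)) × (List (Int × String)) × Int :=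
  (u.zipIdx.map (fun p => (p.1, (p.2 : Int))), u.zipIdx.map (fun p => ((p.2 : Int), p.1)), u.length)

theorem genDicStep_state (u : List String) (sub : List String) :
    genDicStep (genDicState u) sub = genDicState (PySem.Set.add u (sub.headD "")) := by
  simp only [genDicStep, genDicState, PySem.Set.add, PySem.Set.contains]
  have hfst : ((u.zipIdx.map (fun p => (p.1, (p.2 : Int)))).map Prod.fst) = u := by
    simp [List.map_map, Function.comp_def]
  rw [hfst]
  generalize sub.headD "" = k
  by_cases h : k ∈ u
  · simp [h]
  · simp [h, List.zipIdx_append]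

theorem genDic_foldl_state (ks : List (List String)) (u : List String) :
    ks.foldl genDicStep (genDicState u) =
      genDicState (ks.foldl (fun acc sub => PySem.Set.add acc (sub.headD "")) u) := by
  induction ks generalizing u with
  | nil => rfl
  | cons k ks ih => simp [List.foldl_cons, genDicStep_state, ih]

-- A's final state is genDicState of the deduplicated flattened key list
theorem genDic_state (data : List (List (List String))) :
    data.foldl (fun st user => (user.drop 1).foldl genDicStep st) ([], [], 0) =
      genDicState (PySem.List.dedup
        (data.flatMap (fun user => (user.drop 1).map (fun sub => sub.headD "")))) := by
  rw [PySem.List.dedup_eq_ofList, PySem.Set.ofList_eq_foldl]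
  have main : ∀ (l : List (List (List String))) (u : List String),
      l.foldl (fun st user => (user.drop 1).foldl genDicStep st) (genDicState u) =
        genDicState ((l.flatMap (fun user => (user.drop 1).map (fun sub => sub.headD ""))).foldl
          PySem.Set.add u) := by
    intro l
    induction l with
    | nil => intro u; rfl
    | cons user rest ih =>
      intro u
      simp only [List.foldl_cons, List.flatMap_cons, List.foldl_append]
      rw [genDic_foldl_state, List.foldl_map]
      exact ih _
  exact main data []

-- B-SIDE: the backward-overwrite loop as a foldr (the front pair is inserted last, so its value wins)
theorem firstDict_get? (l : List (Int × String)) (k : String) :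
    (l.foldr (fun (p : Int × String) d => d.insert p.2 p.1) PySem.Dict.empty).get? k =
      (l.find? (fun p => p.2 == k)).map (·.1) := by
  induction l with
  | nil => simp [PySem.Dict.empty, PySem.Dict.get?]
  | cons x t ih =>
    rw [List.foldr_cons, PySem.Dict.get?_insert, List.find?_cons]
    by_cases h : x.2 = k
    · simp [h]
    · have hb : (x.2 == k) = false := by simpa using h
      simp [hb, Ne.symm h, ih]

theorem firstDict_mem_keys (l : List (Int × String)) (k : String) :
    k ∈ (l.foldr (fun (p : Int × String) d => d.insert p.2 p.1) PySem.Dict.empty).keys ↔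
      k ∈ l.map (·.2) := by
  induction l with
  | nil => simp [PySem.Dict.keys_empty]
  | cons x t ih => rw [List.foldr_cons, PySem.Dict.mem_keys_insert]; simp [ih]

theorem firstDict_nodup (l : List (Int × String)) :
    (l.foldr (fun (p : Int × String) d => d.insert p.2 p.1) PySem.Dict.empty).keys.Nodup := by
  induction l with
  | nil => simp [PySem.Dict.keys_empty]
  | cons x t ih => exact PySem.Dict.nodup_keys_insert _ _ _ ih

-- find? over enumerate yields the first index of the key
theorem find?_enumerate (keys : List String) (s : Int) (k : String) (h : k ∈ keys) :
    (PySem.List.enumerate keys s).find? (fun p => p.2 == k) = some (s + (keys.idxOf k : Int), k) := by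
  induction keys generalizing s with
  | nil => cases h
  | cons x t ih =>
    rw [PySem.List.enumerate_cons, List.find?_cons]
    by_cases hx : x = k
    · subst hx; simp [List.idxOf_cons_self]
    · simp only [show (((s, x).2 == k) = false) from by simpa using hx]
      have hk : k ∈ t := by cases h with | head => exact absurd rfl hx | tail _ h => exact h
      rw [ih _ hk, List.idxOf_cons_ne t hx]
      push_cast
      ring_nf

-- dedup lists its elements in order of strictly increasing first index
theorem pairwise_idxOf_dedup (xs : List String) :
    (PySem.List.dedup xs).Pairwise (fun a b => xs.idxOf a < xs.idxOf b) := by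
  induction xs with
  | nil => rw [PySem.List.dedup_eq_ofList, PySem.Set.ofList_nil]; exact List.Pairwise.nil
  | cons x t ih =>
    rw [PySem.List.dedup_eq_ofList] at ih ⊢
    rw [PySem.Set.ofList_cons]
    refine List.Pairwise.cons ?_ ?_
    · intro b hb
      obtain ⟨hbmem, hbne⟩ := (PySem.Set.mem_discard _ _ _).mp hb
      rw [List.idxOf_cons_self, List.idxOf_cons_ne _ hbne.symm]
      omega
    · have hsub : ((PySem.Set.ofList t).discard x).Sublist (PySem.Set.ofList t) := by
        simp only [PySem.Set.discard]
        exact List.filter_sublist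
      refine (ih.sublist hsub).imp_of_mem ?_
      intro a b ha hb hlt
      have hax := ((PySem.Set.mem_discard _ _ _).mp ha).2
      have hbx := ((PySem.Set.mem_discard _ _ _).mp hb).2
      rw [List.idxOf_cons_ne _ hax.symm, List.idxOf_cons_ne _ hbx.symm]
      omega

theorem genDic_spec : Claim_equal_genDic := by
  intro data _ _
  unfold Spec_genDic genDic genDic_alt
  dsimp only
  rw [genDic_state]
  -- name the flattened key list
  set keys := data.flatMap (fun user => (user.drop 1).map (fun sub => sub.headD "")) with hkeys
  -- B's first dict as a foldr over enumerate keys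
  have hrange : PySem.List.pyRange ((keys.length : Int) - 1) (-1) (-1) =
      (PySem.List.pyRange 0 (keys.length : Int)).reverse := by
    have := PySem.List.pyRange_neg_one_eq_reverse ((keys.length : Int) - 1) (-1)
    simpa using this
  have hfirst : (PySem.List.pyRange ((keys.length : Int) - 1) (-1) (-1)).foldl
      (fun d pos => d.insert (PySem.List.pyGetD keys pos "") pos) PySem.Dict.empty =
      (PySem.List.enumerate keys).foldr (fun (p : Int × String) d => d.insert p.2 p.1)
        PySem.Dict.empty := by
    rw [hrange, List.foldl_reverse, PySem.List.enumerate_eq_map_pyRange keys "", List.foldr_map]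
    simp [PySem.List.len_eq]
  rw [hfirst]
  set first := (PySem.List.enumerate keys).foldr
      (fun (p : Int × String) d => d.insert p.2 p.1) PySem.Dict.empty with hfirstdef
  -- key facts about first
  have hmem : ∀ k, k ∈ first.keys ↔ k ∈ keys := by
    intro k
    rw [hfirstdef, firstDict_mem_keys, PySem.List.map_snd_enumerate]
  have hget : ∀ k ∈ keys, first.getD k 0 = (keys.idxOf k : Int) := by
    intro k hk
    rw [hfirstdef, PySem.Dict.getD_eq_get?_getD, firstDict_get?, find?_enumerate keys 0 k hk]
    simp
  -- the sorted list is exactly dedup keys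
  have horder : PySem.List.sorted first.keys (fun k => first.getD k 0) = PySem.List.dedup keys := by
    refine PySem.List.sorted_eq_of_perm_of_pairwise_lt _ _ _ ?_ ?_
    · refine (List.perm_ext_iff_of_nodup (PySem.List.nodup_dedup keys) (firstDict_nodup _)).mpr ?_
      intro a
      rw [PySem.List.mem_dedup, hmem]
    · refine (pairwise_idxOf_dedup keys).imp_of_mem ?_
      intro a b ha hb hlt
      rw [hget a ((PySem.List.mem_dedup keys a).mp ha),
          hget b ((PySem.List.mem_dedup keys b).mp hb)]
      exact_mod_cast hlt
  rw [horder]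
  -- both sides are maps over zipIdx of dedup keys
  simp [genDicState, PySem.List.enumerate_eq_zipIdx_map, List.map_map, Function.comp_def]
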